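-- pv_equiv track=rewrite | github.com/Umbral-Tension/python-jtools | src/jtools/jstring.py | capitalize_roman_numerals
-- ===== SOURCE A (Python) =====
-- def replace_by_index(s, i, replacement=''):
--     """
--     replace the character in s at index i with the strign replacement.
--
--     CAUTION: I don't think strings are supposed to be mutable in this way so take care when updating strings
--     that are being iterated through.
--     """
--     l = list(s)
--     l[i] = replacement
--     return ''.join(l)
--
-- def capitalize_roman_numerals(s:str):
--     """
--     Cappitalize roman numerals between 1 and 30, (those containing only characters I-V-X)
--
--     does not make an effort to determine if the roman numeral is valid, only whether there is a set of
--     IVX characters surrounded by non-alphabet characters. ie 'III A String' or 'A string with xIv in it'.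
--
--     The word vix in 'vix vapo rub' will be capitalized. Necessary evil.
--     """
--     roms = 'ivxIVX'
--     valid_surrounds = ' \t\n()[]{}\'"'
--     i = 0
--     while i < len(s):
--         if s[i] in roms:
--             start = i
--             end = None
--             j = i
--             while j+1 < len(s):
--                 if s[j+1] in roms:
--                     j = j+1
--                     continue
--                 else:
--                     end = j
--                     i = j+1
--                     break
--             end = j
--             i = j + 1
--
--             pre, post = False, False
--             if start-1 > -1:
--                 if s[start-1] in valid_surrounds:
--                     pre = True
--             else:
--                 pre = True
--             if end+1 < len(s):
--                 if s[end+1] in valid_surrounds: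
--                     post = True
--             else:
--                 post = True
--             if pre and post:
--                 for x in range(start, end+1):
--                     s = replace_by_index(s, x, s[x].upper())
--                 i = end + 1
--                 continue
--         else:
--             i += 1
--     return s
-- ===== SOURCE B (Python) =====
-- def capitalize_roman_numerals(s: str):
--     roms = set('ivxIVX')
--     surrounds = set(' \t\n()[]{}\'"')
--     # split s into maximal runs of roman-letter chars / non-roman chars
--     runs = []
--     cur = []
--     for c in s:
--         if cur and ((cur[0] in roms) == (c in roms)):
--             cur.append(c)
--         else:
--             if cur:
--                 runs.append(cur)
--             cur = [c]
--     if cur: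
--         runs.append(cur)
--     # uppercase each roman run whose neighbours are valid surrounds (or string ends)
--     out = []
--     for k, tok in enumerate(runs):
--         if tok[0] in roms \
--            and (k == 0 or runs[k - 1][-1] in surrounds) \
--            and (k == len(runs) - 1 or runs[k + 1][0] in surrounds):
--             tok = [ch.upper() for ch in tok]
--         out.append(''.join(tok))
--     return ''.join(out)
-- ===== Notes on version B (the rewrite author's own statement) =====
-- stated objective: faster
-- what changed: A rescans from each index and rebuilds the whole string once per uppercased character via replace_by_index (list(s) + join per char); B tokenizes the string once into maximal roman/non-roman runs, uppercases qualifying runs whole, and joins once.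
import Mathlib
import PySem

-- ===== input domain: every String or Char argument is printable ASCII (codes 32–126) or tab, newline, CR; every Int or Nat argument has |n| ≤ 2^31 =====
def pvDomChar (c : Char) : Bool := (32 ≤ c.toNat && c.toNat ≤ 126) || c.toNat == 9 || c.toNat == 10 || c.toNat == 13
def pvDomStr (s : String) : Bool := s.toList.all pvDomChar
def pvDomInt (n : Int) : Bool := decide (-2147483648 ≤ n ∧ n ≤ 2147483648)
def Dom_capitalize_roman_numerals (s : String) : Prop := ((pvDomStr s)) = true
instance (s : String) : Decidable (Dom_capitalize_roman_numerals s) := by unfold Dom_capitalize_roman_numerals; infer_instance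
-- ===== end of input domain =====

-- B replaces A's index-scan with per-character string rebuilding by a tokenize-into-runs pass
-- that uppercases whole runs and joins once (objective: faster — no quadratic string copying).


-- ===== PORT A =====
-- roms = 'ivxIVX'
def pvRoms : List Char := ['i', 'v', 'x', 'I', 'V', 'X']
-- valid_surrounds = ' \t\n()[]{}\'"'
def pvSurr : List Char := [' ', '\t', '\n', '(', ')', '[', ']', '{', '}', '\'', '\"']

-- l = list(s); l[i] = replacement; return ''.join(l)
-- (i.toNat: A only ever calls this with 0 ≤ i < len(s), where this is exact)
def replace_by_index (s : String) (i : Int) (replacement : String) : String :=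
  String.ofList (PySem.Chars.join [] ((s.toList.map (fun c => [c])).set i.toNat replacement.toList))

-- inner while: advance j while s[j+1] is a roman char; returns the final j (= end)
def pvRunEnd (cs : List Char) (j : Nat) : Nat :=
  if _h : j + 1 < cs.length then
    if pvRoms.contains (cs.getD (j + 1) ' ') then pvRunEnd cs (j + 1) else j
  else j
termination_by cs.length - j

-- body of 'for x in range(start, end+1): s = replace_by_index(s, x, s[x].upper())'
-- (s[x] read as getD with x in range on every call A makes)
def pvUpStep (t : String) (x : Int) : String :=
  replace_by_index t x (PySem.Str.upper (String.ofList [t.toList.getD x.toNat ' ']))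

def pvUpLoop (s : String) (start e : Nat) : String :=
  (PySem.List.pyRange (start : Int) ((e : Int) + 1) 1).foldl pvUpStep s

-- termination support for the outer while loop (cited in decreasing_by)
theorem pv_join_nil (xs : List (List Char)) : PySem.Chars.join [] xs = xs.flatten := by
  induction xs with
  | nil => rfl
  | cons a t ih =>
    cases t with
    | nil => simp [PySem.Chars.join, List.intercalate]
    | cons b t' =>
      rw [PySem.Chars.join_cons_cons]
      simp only [List.flatten_cons, List.append_nil, ih]

theorem pv_flatten_set_singleton (l : List Char) (n : Nat) (d : Char) :
    ((l.map (fun c => [c])).set n [d]).flatten = l.set n d := by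
  induction l generalizing n with
  | nil => simp
  | cons c t ih =>
    cases n with
    | zero => simp [← pv_join_nil, PySem.Chars.join_nil_singletons]
    | succ m => simp_all

theorem pv_upStep_eq (t : String) (x : Int) :
    pvUpStep t x =
      String.ofList (t.toList.set x.toNat
        (PySem.Chars.upperChar (t.toList.getD x.toNat ' '))) := by
  simp [pvUpStep, replace_by_index, PySem.Str.upper, PySem.Chars.upper, pv_join_nil,
    pv_flatten_set_singleton]

theorem pv_length_upFold (l : List Int) (s : String) :
    ((l.foldl pvUpStep s).toList.length) = s.toList.length := by
  induction l generalizing s with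
  | nil => rfl
  | cons x l ih => simp [List.foldl_cons, ih, pv_upStep_eq]

theorem pv_le_runEnd (cs : List Char) (j : Nat) : j ≤ pvRunEnd cs j := by
  fun_induction pvRunEnd cs j with
  | case1 j h hc ih => omega
  | case2 j h hc => omega
  | case3 j h => omega

-- outer 'while i < len(s)' loop of A (i strictly increases each iteration)
def pvLoopA (s : String) (i : Nat) : String :=
  if hi : i < s.toList.length then
    if pvRoms.contains (s.toList.getD i ' ') then
      let j := pvRunEnd s.toList i
      let pre := if i = 0 then true else pvSurr.contains (s.toList.getD (i - 1) ' ')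
      let post := if j + 1 < s.toList.length then pvSurr.contains (s.toList.getD (j + 1) ' ') else true
      if pre && post then pvLoopA (pvUpLoop s i j) (j + 1)
      else pvLoopA s (j + 1)
    else pvLoopA s (i + 1)
  else s
termination_by s.toList.length - i
decreasing_by
  · have h1 := pv_le_runEnd s.toList i
    have h2 := pv_length_upFold (PySem.List.pyRange (i : Int) ((pvRunEnd s.toList i : Int) + 1) 1) s
    simp only [pvUpLoop]
    omega
  · have h1 := pv_le_runEnd s.toList i
    omega
  · omega

def capitalize_roman_numerals (s : String) : String := pvLoopA s 0

-- ===== PORT B =====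
-- loop body of Source B's tokenizer: state = (runs, cur)
def pvTokStep (st : List (List Char) × List Char) (c : Char) : List (List Char) × List Char :=
  if !st.2.isEmpty && (pvRoms.contains (st.2.headD ' ') == pvRoms.contains c) then
    (st.1, st.2 ++ [c])
  else
    ((if st.2.isEmpty then st.1 else st.1 ++ [st.2]), [c])

-- runs = maximal runs of roman / non-roman characters
def pvTokenize (cs : List Char) : List (List Char) :=
  let st := cs.foldl pvTokStep ([], [])
  if st.2.isEmpty then st.1 else st.1 ++ [st.2]

-- body of Source B's output loop (tok[0], runs[k-1][-1], runs[k+1][0]; all accesses are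
-- guarded / in range in Source B, so the getD/headD/getLastD defaults are never returned)
def pvProcTok (runs : List (List Char)) (k : Nat) (tok : List Char) : List Char :=
  if pvRoms.contains (tok.headD ' ')
      && ((k == 0) || pvSurr.contains ((runs.getD (k - 1) []).getLastD ' '))
      && ((k == runs.length - 1) || pvSurr.contains ((runs.getD (k + 1) []).headD ' '))
  then tok.map PySem.Chars.upperChar else tok

def capitalize_roman_numerals_alt (s : String) : String :=
  let runs := pvTokenize s.toList
  let out := (runs.zipIdx).foldl (fun acc p => acc ++ [pvProcTok runs p.2 p.1]) ([] : List (List Char))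
  String.ofList (PySem.Chars.join [] out)

-- ===== PRECONDITION & SPEC =====
def Spec_capitalize_roman_numerals (s : String) (out : String) : Prop := out = capitalize_roman_numerals_alt s
instance (s : String) (out : String) : Decidable (Spec_capitalize_roman_numerals s out) := by unfold Spec_capitalize_roman_numerals; infer_instance

-- ===== CLAIM (what is proved, stated in full; the proofs are below) =====
def Claim_equal_capitalize_roman_numerals : Prop := ∀ (s : String), Dom_capitalize_roman_numerals s → Spec_capitalize_roman_numerals s (capitalize_roman_numerals s)

-- ===== LEMMAS AND PROOFS =====

-- common specification: maximal same-class chunks, processed with previous/next chunk context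
def pvChunks : List Char → List (List Char)
  | [] => []
  | c :: rest =>
    (c :: rest.takeWhile (fun d => pvRoms.contains d == pvRoms.contains c)) ::
      pvChunks (rest.dropWhile (fun d => pvRoms.contains d == pvRoms.contains c))
termination_by cs => cs.length
decreasing_by
  simp only [List.length_cons]
  have := List.length_dropWhile_le (fun d => pvRoms.contains d == pvRoms.contains c) rest
  omega

def pvPre : Option (List Char) → Bool
  | none => true
  | some p => pvSurr.contains (p.getLastD ' ')

def pvPost : Option (List Char) → Bool
  | none => true
  | some t => pvSurr.contains (t.headD ' ')

def pvSpec : Option (List Char) → List (List Char) → List Char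
  | _, [] => []
  | prev, tok :: rest =>
    (if pvRoms.contains (tok.headD ' ') && pvPre prev && pvPost rest.head?
     then tok.map PySem.Chars.upperChar else tok) ++ pvSpec (some tok) rest

-- small list-index helpers
theorem pv_getD_append_length (pre suf : List Char) (d : Char) :
    (pre ++ suf).getD pre.length d = suf.headD d := by
  simp [List.getD, List.getElem?_append_right, ← List.head?_eq_getElem?]

theorem pv_getD_pred_append (pre suf : List Char) (d : Char) (h : pre ≠ []) :
    (pre ++ suf).getD (pre.length - 1) d = pre.getLastD d := by
  have hlt : pre.length - 1 < pre.length := by cases pre with | nil => simp_all | cons a t => simp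
  rw [List.getD, List.getElem?_append_left hlt]
  cases pre with
  | nil => simp_all
  | cons a t => simp [List.getLastD_eq_getLast?, List.getLast?_eq_getElem?]

-- characterisation of the inner while loop
theorem pv_set_append_length (pre : List Char) (c : Char) (t : List Char) (d : Char) :
    (pre ++ c :: t).set pre.length d = pre ++ d :: t := by
  induction pre with
  | nil => rfl
  | cons a p ih => simp [ih]

theorem pv_runEnd_spec (rest : List Char) : ∀ (done : List Char) (c : Char),
    pvRunEnd (done ++ c :: rest) done.length
      = done.length + (rest.takeWhile (fun d => pvRoms.contains d)).length := by
  induction rest with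
  | nil =>
    intro done c
    rw [pvRunEnd]
    simp
  | cons r t ih =>
    intro done c
    rw [pvRunEnd]
    have hlen : done.length + 1 < (done ++ c :: r :: t).length := by simp
    rw [dif_pos hlen]
    have hget : (done ++ c :: r :: t).getD (done.length + 1) ' ' = r := by
      have h := pv_getD_append_length (done ++ [c]) (r :: t) ' '
      simpa using h
    rw [hget]
    by_cases hr : pvRoms.contains r = true
    · rw [if_pos hr]
      have h := ih (done ++ [c]) r
      have e1 : done ++ [c] ++ r :: t = done ++ c :: r :: t := by simp
      have e2 : (done ++ [c]).length = done.length + 1 := by simp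
      rw [e1, e2] at h
      rw [h, List.takeWhile_cons_of_pos hr]
      have e3 : List.takeWhile pvRoms.contains t = List.takeWhile (fun d => pvRoms.contains d) t := rfl
      rw [e3]
      simp only [List.length_cons]
      omega
    · rw [if_neg hr, List.takeWhile_cons_of_neg hr]
      simp

-- characterisation of the uppercase-in-place loop
theorem pv_upLoop_spec (mid : List Char) : ∀ (pre post : List Char),
    (PySem.List.pyRange (pre.length : Int) ((pre.length : Int) + mid.length) 1).foldl pvUpStep
        (String.ofList (pre ++ mid ++ post))
      = String.ofList (pre ++ mid.map PySem.Chars.upperChar ++ post) := by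
  induction mid with
  | nil =>
    intro pre post
    rw [PySem.List.pyRange_one_eq_nil (by simp)]
    simp
  | cons c mid' ih =>
    intro pre post
    rw [PySem.List.pyRange_one_cons (by simp only [List.length_cons]; push_cast; omega)]
    simp only [List.foldl_cons]
    have hstep : pvUpStep (String.ofList (pre ++ c :: mid' ++ post)) (pre.length : Int)
        = String.ofList ((pre ++ [PySem.Chars.upperChar c]) ++ (mid' ++ post)) := by
      rw [pv_upStep_eq]
      have hget : (pre ++ c :: (mid' ++ post)).getD pre.length ' ' = c := by
        simpa using pv_getD_append_length pre (c :: (mid' ++ post)) ' '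
      simp only [String.toList_ofList, Int.toNat_natCast, List.cons_append, List.append_assoc] at *
      rw [hget, pv_set_append_length]
      simp
    rw [hstep]
    have h := ih (pre ++ [PySem.Chars.upperChar c]) post
    simp only [List.length_append, List.length_cons, List.length_nil, List.append_assoc,
      List.cons_append, List.nil_append] at h ⊢
    push_cast at h ⊢
    rw [show ((pre.length : Int) + ((mid'.length : Int) + 1)) = (pre.length : Int) + 1 + mid'.length by ring]
    simpa using h

-- pvSpec only reads prev through pvPre, and only when the first chunk starts roman
theorem pv_spec_pre_congr (p₁ p₂ : Option (List Char)) (l : List (List Char))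
    (h : pvPre p₁ = pvPre p₂) : pvSpec p₁ l = pvSpec p₂ l := by
  cases l <;> simp [pvSpec, h]

-- a nonempty homogeneous block extends into the first chunk
theorem pv_chunk_hom (cur cs : List Char) (b : Bool) (hne : cur ≠ [])
    (hhom : ∀ d ∈ cur, pvRoms.contains d = b) :
    pvChunks (cur ++ cs)
      = (cur ++ cs.takeWhile (fun d => pvRoms.contains d == b)) ::
          pvChunks (cs.dropWhile (fun d => pvRoms.contains d == b)) := by
  obtain ⟨c, cur', rfl⟩ : ∃ c cur', cur = c :: cur' := by
    cases cur with | nil => simp_all | cons a t => exact ⟨a, t, rfl⟩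
  have hc : pvRoms.contains c = b := hhom c (by simp)
  rw [List.cons_append, pvChunks]
  simp only [hc]
  have hcur' : ∀ a ∈ cur', (fun d => pvRoms.contains d == b) a = true := by
    intro a ha
    have h2 := hhom a (List.mem_cons_of_mem c ha)
    show (pvRoms.contains a == b) = true
    rw [h2, beq_self_eq_true]
  rw [List.takeWhile_append_of_pos hcur', List.dropWhile_append_of_pos hcur']
  simp

-- a homogeneous block followed by an opposite-class (or empty) remainder is one chunk
theorem pv_chunk_block (blk dw : List Char) (b : Bool) (hne : blk ≠ [])
    (hhom : ∀ d ∈ blk, pvRoms.contains d = b)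
    (hdw : ∀ h : dw ≠ [], pvRoms.contains (dw.head h) = (!b)) :
    pvChunks (blk ++ dw) = blk :: pvChunks dw := by
  rw [pv_chunk_hom blk dw b hne hhom]
  cases dw with
  | nil => simp
  | cons d t =>
    have hd : pvRoms.contains d = (!b) := hdw (by simp)
    have hneg : ¬ ((pvRoms.contains d == b) = true) := by rw [hd]; cases b <;> simp
    rw [List.takeWhile_cons_of_neg (p := fun x => pvRoms.contains x == b) hneg,
      List.dropWhile_cons_of_neg (p := fun x => pvRoms.contains x == b) hneg]
    simp

theorem pv_spec_cons_nonrom (prev : Option (List Char)) (c : Char) (rest : List Char)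
    (hc : pvRoms.contains c = false) :
    pvSpec prev (pvChunks (c :: rest)) = c :: pvSpec (some [c]) (pvChunks rest) := by
  have hc' : c ∉ pvRoms := by simpa using hc
  rw [pvChunks]
  simp only [hc]
  cases rest with
  | nil => simp [pvSpec, hc']
  | cons r t =>
    by_cases hr : pvRoms.contains r = true
    · have hr' : r ∈ pvRoms := by simpa using hr
      rw [List.takeWhile_cons_of_neg (p := fun x => pvRoms.contains x == false) (by simp [hr']),
        List.dropWhile_cons_of_neg (p := fun x => pvRoms.contains x == false) (by simp [hr'])]
      simp [pvSpec, hc']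
    · have hrf : pvRoms.contains r = false := by simpa using hr
      have hrr : r ∉ pvRoms := by simpa using hrf
      have htw : List.takeWhile (fun d => pvRoms.contains d == false) (r :: t)
          = r :: List.takeWhile (fun d => pvRoms.contains d == false) t :=
        List.takeWhile_cons_of_pos (by simp [hrr])
      have hdw : List.dropWhile (fun d => pvRoms.contains d == false) (r :: t)
          = List.dropWhile (fun d => pvRoms.contains d == false) t :=
        List.dropWhile_cons_of_pos (by simp [hrr])
      rw [htw, hdw]
      have hhomtw : ∀ d ∈ r :: List.takeWhile (fun d => pvRoms.contains d == false) t,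
          pvRoms.contains d = false := by
        intro d hd
        rcases List.mem_cons.mp hd with h | h
        · subst h; exact hrf
        · have h2 := List.mem_takeWhile_imp h
          simpa using h2
      have hdwh : ∀ h : (List.dropWhile (fun d => pvRoms.contains d == false) t) ≠ [],
          pvRoms.contains ((List.dropWhile (fun d => pvRoms.contains d == false) t).head h)
            = (!false) := by
        intro h
        have h3 := List.head_dropWhile_not (fun d => pvRoms.contains d == false) (l := t) h
        simpa using h3
      have hchunks : pvChunks (r :: t)
          = (r :: List.takeWhile (fun d => pvRoms.contains d == false) t) ::
              pvChunks (List.dropWhile (fun d => pvRoms.contains d == false) t) := by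
        conv_lhs => rw [show r :: t
            = (r :: List.takeWhile (fun d => pvRoms.contains d == false) t)
              ++ List.dropWhile (fun d => pvRoms.contains d == false) t by
          simp [List.takeWhile_append_dropWhile]]
        exact pv_chunk_block _ _ false (by simp) hhomtw hdwh
      rw [hchunks]
      have hpre : pvPre (some (c :: r :: List.takeWhile (fun d => pvRoms.contains d == false) t))
          = pvPre (some (r :: List.takeWhile (fun d => pvRoms.contains d == false) t)) := by
        simp [pvPre]
      simp only [pvSpec, List.headD_cons, hc, hrf, Bool.false_and, Bool.false_eq_true, if_false,
        List.cons_append]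
      rw [pv_spec_pre_congr _ _ _ hpre]

-- ===== A-side main lemma =====
theorem pv_drop_head_notrom (l : List Char) :
    pvRoms.contains ((l.dropWhile (fun d => pvRoms.contains d)).headD ' ') = false := by
  induction l with
  | nil => decide
  | cons a t ih =>
    by_cases ha : pvRoms.contains a = true
    · rw [List.dropWhile_cons_of_pos (by simpa using ha)]
      exact ih
    · rw [List.dropWhile_cons_of_neg (by simpa using ha)]
      simpa using ha

theorem pv_chunks_rom (c : Char) (rest : List Char) (hrom : pvRoms.contains c = true) :
    pvChunks (c :: rest)
      = (c :: rest.takeWhile (fun d => pvRoms.contains d)) ::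
          pvChunks (rest.dropWhile (fun d => pvRoms.contains d)) := by
  rw [pvChunks]
  simp only [hrom]
  have hfe : (fun d => pvRoms.contains d == true) = (fun d => pvRoms.contains d) := by
    funext d; cases pvRoms.contains d <;> simp
  rw [hfe]

theorem pv_loopA_spec (N : Nat) : ∀ (todo : List Char), todo.length ≤ N →
    ∀ (done : List Char) (prev : Option (List Char)),
    (pvRoms.contains (todo.headD ' ') = true →
      (match prev with
       | none => done = []
       | some p => done ≠ [] ∧ pvRoms.contains (done.getLastD ' ') = false ∧
           pvSurr.contains (done.getLastD ' ') = pvSurr.contains (p.getLastD ' '))) →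
    pvLoopA (String.ofList (done ++ todo)) done.length
      = String.ofList (done ++ pvSpec prev (pvChunks todo)) := by
  induction N with
  | zero =>
    intro todo hlen done prev _
    have h0 : todo = [] := List.eq_nil_of_length_eq_zero (by omega)
    subst h0
    rw [pvLoopA]
    rw [dif_neg (by simp)]
    simp [pvChunks, pvSpec]
  | succ N ih =>
    intro todo hlen done prev hprev
    cases todo with
    | nil =>
      rw [pvLoopA]
      rw [dif_neg (by simp)]
      simp [pvChunks, pvSpec]
    | cons c rest =>
      rw [pvLoopA]
      rw [dif_pos (by simp)]
      have hget : (String.ofList (done ++ c :: rest)).toList.getD done.length ' ' = c := by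
        simp only [String.toList_ofList]
        simpa using pv_getD_append_length done (c :: rest) ' '
      rw [hget]
      by_cases hrom : pvRoms.contains c = true
      · -- roman run starting at i
        rw [if_pos hrom]
        have hp := hprev (by simpa using hrom)
        simp only [String.toList_ofList]
        set tk := rest.takeWhile (fun d => pvRoms.contains d) with htk
        set dwr := rest.dropWhile (fun d => pvRoms.contains d) with hdwr
        have hj : pvRunEnd (done ++ c :: rest) done.length = done.length + tk.length := by
          rw [htk]; exact pv_runEnd_spec rest done c
        rw [hj]
        have htd : tk ++ dwr = rest := List.takeWhile_append_dropWhile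
        have hlen2 : rest.length = tk.length + dwr.length := by
          conv_lhs => rw [← htd]
          simp
        -- pre equals pvPre prev
        have hpre : (if done.length = 0 then true
            else pvSurr.contains ((done ++ c :: rest).getD (done.length - 1) ' ')) = pvPre prev := by
          cases prev with
          | none =>
            have hd : done = [] := hp
            subst hd
            simp [pvPre]
          | some p =>
            obtain ⟨hne, _, hsur⟩ := hp
            rw [if_neg (by simpa using hne), pv_getD_pred_append _ _ _ hne]
            simpa [pvPre] using hsur
        -- post equals pvPost of the next chunk
        have hpost : (if done.length + tk.length + 1 < (done ++ c :: rest).length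
              then pvSurr.contains ((done ++ c :: rest).getD (done.length + tk.length + 1) ' ')
              else true) = pvPost (pvChunks dwr).head? := by
          cases hdw : dwr with
          | nil =>
            rw [if_neg (by simp [List.length_append, hlen2, hdw]; omega)]
            simp [pvChunks, pvPost]
          | cons d dt =>
            rw [if_pos (by simp [List.length_append, hlen2, hdw]; omega)]
            have hsplit : done ++ c :: rest = (done ++ c :: tk) ++ (d :: dt) := by
              rw [← htd, hdw]; simp
            have hlen3 : (done ++ c :: tk).length = done.length + tk.length + 1 := by
              simp; omega
            rw [hsplit, ← hlen3, pv_getD_append_length]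
            rw [pvChunks]
            simp [pvPost]
        rw [hpre, hpost]
        have hchunks : pvChunks (c :: rest) = (c :: tk) :: pvChunks dwr := pv_chunks_rom c rest hrom
        have hdnext : pvRoms.contains (dwr.headD ' ') = false := by
          rw [hdwr]; exact pv_drop_head_notrom rest
        have hK : ¬ (pvRoms.contains (dwr.headD ' ') = true) := fun hh => by
          rw [hh] at hdnext; cases hdnext
        have hdlen : dwr.length ≤ N := by
          simp only [List.length_cons] at hlen
          omega
        by_cases hpp : (pvPre prev && pvPost (pvChunks dwr).head?) = true
        · rw [if_pos hpp]
          -- the uppercase loop rewrites the run in place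
          have hup : pvUpLoop (String.ofList (done ++ c :: rest)) done.length
                (done.length + tk.length)
              = String.ofList (done ++ (c :: tk).map PySem.Chars.upperChar ++ dwr) := by
            rw [pvUpLoop]
            have hrange : ((done.length + tk.length : Nat) : Int) + 1
                = (done.length : Int) + ((c :: tk).length : Int) := by
              push_cast; simp; ring
            rw [hrange]
            conv_lhs => rw [show done ++ c :: rest = done ++ (c :: tk) ++ dwr by
              rw [← htd]; simp]
            exact pv_upLoop_spec (c :: tk) done dwr
          rw [hup]
          have hlen4 : done.length + tk.length + 1
              = (done ++ (c :: tk).map PySem.Chars.upperChar).length := by simp; omega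
          rw [hlen4]
          have hrec := ih dwr hdlen (done ++ (c :: tk).map PySem.Chars.upperChar)
            (some (c :: tk)) (fun hh => absurd hh hK)
          rw [hrec, hchunks]
          simp only [pvSpec, List.headD_cons, hrom, Bool.true_and]
          rw [hpp]
          simp
        · rw [if_neg hpp]
          have hlen5 : done.length + tk.length + 1 = (done ++ (c :: tk)).length := by simp; omega
          conv_lhs => rw [show done ++ c :: rest = (done ++ (c :: tk)) ++ dwr by
            rw [← htd]; simp]
          rw [hlen5]
          have hrec := ih dwr hdlen (done ++ (c :: tk)) (some (c :: tk))
            (fun hh => absurd hh hK)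
          rw [hrec, hchunks]
          have hppf : (pvPre prev && pvPost (pvChunks dwr).head?) = false := by
            simpa using hpp
          simp only [pvSpec, List.headD_cons, hrom, Bool.true_and]
          rw [hppf]
          simp
      · -- non-roman character: step one position
        rw [if_neg hrom]
        have hcf : pvRoms.contains c = false := by simpa using hrom
        have hlen6 : done.length + 1 = (done ++ [c]).length := by simp
        conv_lhs => rw [show done ++ c :: rest = (done ++ [c]) ++ rest by simp]
        rw [hlen6]
        have hrec := ih rest (by simpa using hlen) (done ++ [c]) (some [c]) ?_
        · rw [hrec, pv_spec_cons_nonrom prev c rest hcf]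
          simp
        · intro _
          refine ⟨by simp, ?_, ?_⟩
          · simpa using hcf
          · simp

-- ===== B-side main lemmas =====
def pvFinish (st : List (List Char) × List Char) : List (List Char) :=
  if st.2.isEmpty then st.1 else st.1 ++ [st.2]

theorem pv_tok_inv (cs : List Char) : ∀ (runs : List (List Char)) (cur : List Char) (b : Bool),
    cur ≠ [] → (∀ d ∈ cur, pvRoms.contains d = b) →
    pvFinish (cs.foldl pvTokStep (runs, cur)) = runs ++ pvChunks (cur ++ cs) := by
  induction cs with
  | nil =>
    intro runs cur b hne hhom
    have hfin : pvFinish (runs, cur) = runs ++ [cur] := by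
      simp only [pvFinish]
      rw [if_neg (by simpa using hne)]
    rw [List.foldl_nil, hfin, pv_chunk_block cur [] b hne hhom (fun h => absurd rfl h)]
    simp [pvChunks]
  | cons x cs' ih =>
    intro runs cur b hne hhom
    rw [List.foldl_cons]
    have hhead : pvRoms.contains (cur.headD ' ') = b := by
      cases cur with | nil => simp_all | cons a t => exact hhom a (by simp)
    by_cases hx : pvRoms.contains x = b
    · have hstep : pvTokStep (runs, cur) x = (runs, cur ++ [x]) := by
        simp only [pvTokStep]
        rw [if_pos (by rw [hhead, hx]; simp [hne])]
      rw [hstep]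
      have hhom2 : ∀ d ∈ cur ++ [x], pvRoms.contains d = b := by
        intro d hd
        rcases List.mem_append.mp hd with h | h
        · exact hhom d h
        · simp at h; subst h; exact hx
      rw [ih runs (cur ++ [x]) b (by simp) hhom2]
      congr 2
      simp
    · have hxf : pvRoms.contains x = (!b) := by cases b <;> simp_all
      have hstep : pvTokStep (runs, cur) x = (runs ++ [cur], [x]) := by
        simp only [pvTokStep]
        rw [if_neg (by rw [hhead, hxf]; cases b <;> simp), if_neg (by simpa using hne)]
      rw [hstep]
      have h2 := ih (runs ++ [cur]) [x] (pvRoms.contains x) (by simp)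
        (by intro d hd; simp at hd; subst hd; rfl)
      rw [h2]
      rw [show cur ++ x :: cs' = cur ++ ([x] ++ cs') by simp]
      rw [show cur ++ ([x] ++ cs') = cur ++ ([x] ++ cs') from rfl]
      rw [← List.append_assoc cur [x] cs']
      rw [show (cur ++ [x]) ++ cs' = cur ++ ([x] ++ cs') from List.append_assoc _ _ _]
      rw [pv_chunk_block cur ([x] ++ cs') b hne hhom
        (fun h => by simpa using hxf)]
      simp

theorem pv_tokenize_eq_chunks (cs : List Char) : pvTokenize cs = pvChunks cs := by
  cases cs with
  | nil => simp [pvTokenize, pvChunks]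
  | cons c rest =>
    have hstep : pvTokStep (([] : List (List Char)), ([] : List Char)) c = ([], [c]) := by
      simp [pvTokStep]
    have h2 := pv_tok_inv rest [] [c] (pvRoms.contains c) (by simp)
      (by intro d hd; simp at hd; subst hd; rfl)
    simp only [pvFinish] at h2
    simp only [pvTokenize, List.foldl_cons, hstep]
    simpa using h2

theorem pv_procIdx (suf : List (List Char)) : ∀ (full : List (List Char)) (k0 : Nat)
    (prev : Option (List Char)), full.drop k0 = suf →
    (if k0 = 0 then prev = none else prev = some (full.getD (k0 - 1) [])) →
    ((suf.zipIdx k0).map (fun p => pvProcTok full p.2 p.1)).flatten = pvSpec prev suf := by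
  induction suf with
  | nil => intro full k0 prev _ _; simp [pvSpec]
  | cons tok rest ih =>
    intro full k0 prev hdrop hprev
    rw [List.zipIdx_cons]
    simp only [List.map_cons, List.flatten_cons]
    have hk0lt : k0 < full.length := by
      by_contra h
      rw [List.drop_eq_nil_iff.mpr (by omega)] at hdrop
      cases hdrop
    have hlen : full.length - k0 = rest.length + 1 := by
      have h3 := congrArg List.length hdrop
      simp [List.length_drop] at h3
      omega
    have hgetk0 : full.getD k0 [] = tok := by
      rw [List.getD, ← List.head?_drop, hdrop]
      rfl
    have hproc : pvProcTok full k0 tok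
        = (if pvRoms.contains (tok.headD ' ') && pvPre prev && pvPost rest.head?
           then tok.map PySem.Chars.upperChar else tok) := by
      unfold pvProcTok
      have hpreeq : ((k0 == 0) || pvSurr.contains ((full.getD (k0 - 1) []).getLastD ' '))
          = pvPre prev := by
        by_cases hk : k0 = 0
        · rw [if_pos hk] at hprev
          subst hprev
          simp [hk, pvPre]
        · rw [if_neg hk] at hprev
          subst hprev
          simp [hk, pvPre]
      have hposteq : ((k0 == full.length - 1) || pvSurr.contains ((full.getD (k0 + 1) []).headD ' '))
          = pvPost rest.head? := by
        cases rest with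
        | nil =>
          have hk : k0 = full.length - 1 := by simp only [List.length_nil] at hlen; omega
          simp [hk, pvPost]
        | cons r rt =>
          have hk : k0 ≠ full.length - 1 := by simp only [List.length_cons] at hlen; omega
          have hget1 : full.getD (k0 + 1) [] = r := by
            rw [List.getD, ← List.head?_drop, ← List.tail_drop, hdrop]
            rfl
          rw [hget1]
          simp [hk, pvPost]
      rw [hpreeq, hposteq]
    rw [hproc]
    have hdrop2 : full.drop (k0 + 1) = rest := by
      rw [← List.tail_drop, hdrop]
      rfl
    have hrec := ih full (k0 + 1) (some tok) hdrop2
      (by rw [if_neg (Nat.succ_ne_zero k0), Nat.add_sub_cancel, hgetk0])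
    rw [hrec]
    simp only [pvSpec]

theorem pv_alt_eq (s : String) :
    capitalize_roman_numerals_alt s = String.ofList (pvSpec none (pvChunks s.toList)) := by
  show String.ofList (PySem.Chars.join []
      ((( pvTokenize s.toList).zipIdx).foldl
        (fun acc p => acc ++ [pvProcTok (pvTokenize s.toList) p.2 p.1]) [])) = _
  rw [PySem.List.foldl_append_singleton_eq_map, pv_join_nil]
  simp only [List.nil_append, pv_tokenize_eq_chunks]
  rw [pv_procIdx (pvChunks s.toList) (pvChunks s.toList) 0 none (by simp) (by simp)]

-- ===== VERDICT (by name: the statement is the Claim_ definition above) =====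
theorem capitalize_roman_numerals_spec : Claim_equal_capitalize_roman_numerals := by
  intro s _
  unfold Spec_capitalize_roman_numerals
  rw [pv_alt_eq]
  show pvLoopA s 0 = _
  have h1 : pvLoopA s 0
      = pvLoopA (String.ofList (([] : List Char) ++ s.toList)) (([] : List Char)).length := by
    simp
  rw [h1, pv_loopA_spec s.toList.length s.toList le_rfl [] none (fun _ => rfl)]
  simp
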